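-- pv_equiv track=rewrite | github.com/shawnkuo-ghw/combiAlgo_assignments | 24winter/hw01_ddl_2024_11_20_1200AM/test.py | dec2fac
-- ===== SOURCE A (Python) =====
-- def dec2fac(dec_num: int, n: int) -> list:
--     # Transform a decimal number into an n-digit factorial base number.
--     fac_num = [0] * n
--     q, r, i = dec_num, 0, 1
--     while q > 0:
--         q, r = q // i, q % i
--         # fac_num = fac_num + [r]
--         fac_num[i-1] = r
--         i = i + 1
--     return fac_num
-- ===== SOURCE B (Python) =====
-- def dec2fac(dec_num: int, n: int) -> list:
--     # n-digit factorial base representation: digit p is (dec_num // p!) % (p+1),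
--     # computed independently from the ORIGINAL dec_num with an accumulated factorial.
--     fac_num = [0] * n
--     fact, p = 1, 0
--     while dec_num // fact > 0:
--         fac_num[p] = (dec_num // fact) % (p + 1)
--         p += 1
--         fact *= p
--     return fac_num
-- ===== Notes on version B (the rewrite author's own statement) =====
-- stated objective: alternative
-- what changed: Instead of carrying a shrinking quotient q divided in place each step, B keeps an accumulated factorial p! and computes every digit independently from the original dec_num by the closed form (dec_num // p!) % (p+1).
import Mathlib
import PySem

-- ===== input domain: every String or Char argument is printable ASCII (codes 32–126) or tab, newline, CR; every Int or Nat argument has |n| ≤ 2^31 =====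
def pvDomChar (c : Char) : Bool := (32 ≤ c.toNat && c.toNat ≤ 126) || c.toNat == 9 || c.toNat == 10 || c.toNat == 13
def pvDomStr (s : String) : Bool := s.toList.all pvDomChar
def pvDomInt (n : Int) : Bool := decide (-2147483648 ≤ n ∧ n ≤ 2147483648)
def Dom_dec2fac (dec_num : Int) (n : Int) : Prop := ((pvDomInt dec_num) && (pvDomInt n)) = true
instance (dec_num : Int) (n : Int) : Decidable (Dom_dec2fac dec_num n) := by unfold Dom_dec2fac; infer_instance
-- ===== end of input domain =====

-- B computes each factorial-base digit independently from the original dec_num via an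
-- accumulated factorial, instead of A's shrinking in-place quotient (alternative decomposition).


-- used by the termination proofs of both loops (cited in their decreasing_by)
lemma pvEdivLtSelf (a b : Int) (ha : 0 < a) (hb : 1 < b) : a / b < a := by
  rw [Int.ediv_lt_iff_lt_mul (by omega)]
  nlinarith

-- ===== PORT A =====
-- while q > 0: q, r = q // i, q % i; fac_num[i-1] = r; i += 1
-- (i starts at 1 and only increases, hence Nat; on the IndexError of fac_num[i-1] = r,
--  pySet? is none and we return the current list — such inputs are outside Pre_.)
def dec2facLoopA (fac_num : List Int) (q : Int) (i : Nat) : List Int :=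
  if q > 0 then
    let q' := PySem.Int.floordiv q (i : Int)
    let r := PySem.Int.mod q (i : Int)
    match PySem.List.pySet? fac_num ((i : Int) - 1) r with
    | some l => dec2facLoopA l q' (i + 1)
    | none => fac_num
  else fac_num
  termination_by q.toNat + (if i ≤ 1 then 1 else 0)
  decreasing_by
    rename_i h
    rcases Nat.lt_or_ge i 2 with hi | hi
    · interval_cases i <;>
        simp [PySem.Int.floordiv, Int.fdiv_zero, Int.fdiv_one] <;> omega
    · have hpos : (0 : Int) < (i : Int) := by exact_mod_cast (by omega : 0 < i)
      have h1 : PySem.Int.floordiv q (i : Int) < q := by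
        rw [PySem.Int.floordiv_eq_ediv_of_pos hpos]
        exact pvEdivLtSelf q (i : Int) h (by exact_mod_cast hi)
      have hii : ¬ (i + 1 ≤ 1) := by omega
      simp [hii]
      omega

def dec2fac (dec_num : Int) (n : Int) : List Int :=
  dec2facLoopA (List.replicate n.toNat 0) dec_num 1

-- ===== PORT B =====
-- while dec_num // fact > 0: fac_num[p] = (dec_num // fact) % (p+1); p += 1; fact *= p
-- (fact and p start at 1, 0 and only grow, hence Nat.)
def dec2facLoopB (fac_num : List Int) (dec_num : Int) (fact : Nat) (p : Nat) : List Int :=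
  if PySem.Int.floordiv dec_num (fact : Int) > 0 then
    match PySem.List.pySet? fac_num (p : Int)
        (PySem.Int.mod (PySem.Int.floordiv dec_num (fact : Int)) ((p : Int) + 1)) with
    | some l => dec2facLoopB l dec_num (fact * (p + 1)) (p + 1)
    | none => fac_num
  else fac_num
  termination_by (PySem.Int.floordiv dec_num (fact : Int)).toNat + (if p = 0 then 1 else 0)
  decreasing_by
    rename_i h
    have hfact : 0 < fact := by
      rcases Nat.eq_zero_or_pos fact with h0 | h0
      · exfalso; rw [h0] at h; simp [PySem.Int.floordiv, Int.fdiv_zero] at h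
      · exact h0
    have hfpos : (0 : Int) < ((fact : Nat) : Int) := by exact_mod_cast hfact
    rcases Nat.eq_zero_or_pos p with hp | hp
    · subst hp; simp
    · have hcomp : PySem.Int.floordiv dec_num ((fact * (p + 1) : Nat) : Int)
          = PySem.Int.floordiv (PySem.Int.floordiv dec_num (fact : Int)) ((p : Int) + 1) := by
        rw [PySem.Int.floordiv_eq_ediv_of_pos (b := ((fact * (p+1) : Nat) : Int)) (by positivity),
            PySem.Int.floordiv_eq_ediv_of_pos hfpos,
            PySem.Int.floordiv_eq_ediv_of_pos (by positivity)]
        push_cast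
        rw [Int.ediv_ediv_of_nonneg (le_of_lt hfpos)]
      have hlt : PySem.Int.floordiv dec_num ((fact * (p + 1) : Nat) : Int)
          < PySem.Int.floordiv dec_num (fact : Int) := by
        rw [hcomp, PySem.Int.floordiv_eq_ediv_of_pos (by positivity)]
        exact pvEdivLtSelf _ _ h (by exact_mod_cast (by omega : 1 < p + 1))
      simp only [Nat.cast_mul, Nat.cast_add, Nat.cast_one] at hlt
      push_cast
      omega

def dec2fac_alt (dec_num : Int) (n : Int) : List Int :=
  dec2facLoopB (List.replicate n.toNat 0) dec_num 1 0

-- ===== PRECONDITION & SPEC =====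
-- Decides "d < fact * (i+1) * (i+2) * ... * n" (so pvLtFac d n ↔ d < n!) with an early
-- stop as soon as the running product already exceeds d, so it evaluates in a handful of
-- steps even when n is near 2^31.  It is only a factorial-threshold test, not either loop.
def pvLtFacAux (d : Int) (fact : Int) (i : Nat) : Nat → Bool
  | 0 => decide (d < fact)
  | k + 1 => if d < fact then true else pvLtFacAux d (fact * ((i : Int) + 1)) (i + 1) k
def pvLtFac (d : Int) (n : Nat) : Bool := pvLtFacAux d 1 0 n
-- Pre_ admits exactly the inputs on which Python A returns normally: A raises IndexError
-- iff dec_num > 0 and (n < 0 or dec_num ≥ n!); pvLtFac dec_num n.toNat decides dec_num < n!.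
def Pre_dec2fac (dec_num : Int) (n : Int) : Prop :=
  dec_num ≤ 0 ∨ (0 ≤ n ∧ pvLtFac dec_num n.toNat = true)
instance (dec_num : Int) (n : Int) : Decidable (Pre_dec2fac dec_num n) := by
  unfold Pre_dec2fac; infer_instance
def pvWitness_dec2fac : Int × Int := (23, 4)
def Spec_dec2fac (dec_num : Int) (n : Int) (out : List Int) : Prop := out = dec2fac_alt dec_num n
instance (dec_num : Int) (n : Int) (out : List Int) : Decidable (Spec_dec2fac dec_num n out) := by
  unfold Spec_dec2fac; infer_instance

-- ===== CLAIM (what is proved, stated in full; the proofs are below) =====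
def Claim_equal_dec2fac : Prop := ∀ (dec_num : Int) (n : Int), Dom_dec2fac dec_num n → Pre_dec2fac dec_num n → Spec_dec2fac dec_num n (dec2fac dec_num n)

-- ===== LEMMAS AND PROOFS =====

-- The invariant tying the loops: A's state at index i = p+1 is q = dec_num // fact for the
-- accumulated fact (any positive fact; A's is (p)! but the proof does not need that).
lemma dec2fac_loop_eq (m : Nat) : ∀ (fac : List Int) (dec : Int) (fact p : Nat),
    (PySem.Int.floordiv dec (fact : Int)).toNat + (if p = 0 then 1 else 0) ≤ m →
    dec2facLoopA fac (PySem.Int.floordiv dec (fact : Int)) (p + 1)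
      = dec2facLoopB fac dec fact p := by
  induction m with
  | zero =>
    intro fac dec fact p hm
    have hp : ¬ p = 0 := by intro h; simp [h] at hm
    have hq : ¬ (PySem.Int.floordiv dec (fact : Int) > 0) := by
      intro h; omega
    rw [dec2facLoopA, dec2facLoopB, if_neg hq, if_neg hq]
  | succ m ih =>
    intro fac dec fact p hm
    rw [dec2facLoopA, dec2facLoopB]
    by_cases hq : PySem.Int.floordiv dec (fact : Int) > 0
    · rw [if_pos hq, if_pos hq]
      have hfact : 0 < fact := by
        rcases Nat.eq_zero_or_pos fact with h0 | h0
        · exfalso; rw [h0] at hq; simp [PySem.Int.floordiv, Int.fdiv_zero] at hq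
        · exact h0
      have hidx : ((p + 1 : Nat) : Int) - 1 = (p : Int) := by push_cast; ring
      have hmod : ((p + 1 : Nat) : Int) = (p : Int) + 1 := by push_cast; ring
      rw [hidx, hmod]
      have hfpos : (0 : Int) < ((fact : Nat) : Int) := by exact_mod_cast hfact
      cases hset : PySem.List.pySet? fac (p : Int)
          (PySem.Int.mod (PySem.Int.floordiv dec (fact : Int)) ((p : Int) + 1)) with
      | none => simp only [hset]
      | some l =>
        have hcomp : PySem.Int.floordiv (PySem.Int.floordiv dec (fact : Int)) ((p : Int) + 1)
            = PySem.Int.floordiv dec ((fact * (p + 1) : Nat) : Int) := by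
          rw [PySem.Int.floordiv_eq_ediv_of_pos (b := ((fact * (p+1) : Nat) : Int)) (by positivity),
              PySem.Int.floordiv_eq_ediv_of_pos hfpos,
              PySem.Int.floordiv_eq_ediv_of_pos (by positivity)]
          push_cast
          rw [Int.ediv_ediv_of_nonneg (le_of_lt hfpos)]
        simp only [hset, hcomp]
        apply ih
        -- the new measure is below m
        rcases Nat.eq_zero_or_pos p with hp | hp
        · subst hp
          have : fact * (0 + 1) = fact := by ring
          rw [this]
          simp at hm ⊢
          omega
        · have hlt : PySem.Int.floordiv dec ((fact * (p + 1) : Nat) : Int)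
              < PySem.Int.floordiv dec (fact : Int) := by
            rw [← hcomp, PySem.Int.floordiv_eq_ediv_of_pos (by positivity)]
            exact pvEdivLtSelf _ _ hq (by exact_mod_cast (by omega : 1 < p + 1))
          have hp' : ¬ (p = 0) := by omega
          simp only [hp', if_false] at hm ⊢
          push_cast
          simp only [Nat.cast_mul, Nat.cast_add, Nat.cast_one] at hlt
          omega
    · rw [if_neg hq, if_neg hq]

lemma dec2fac_eq_alt (dec_num n : Int) : dec2fac dec_num n = dec2fac_alt dec_num n := by
  unfold dec2fac dec2fac_alt
  have h1 : PySem.Int.floordiv dec_num ((1 : Nat) : Int) = dec_num := by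
    simp [PySem.Int.floordiv, Int.fdiv_one]
  have := dec2fac_loop_eq (dec_num.toNat + 1) (List.replicate n.toNat 0) dec_num 1 0
    (by simp [h1])
  rw [h1] at this
  simpa using this

-- ===== VERDICT (by name: the statement is the Claim_ definition above) =====
theorem dec2fac_spec : Claim_equal_dec2fac := by
  intro dec_num n _ _
  unfold Spec_dec2fac
  exact dec2fac_eq_alt dec_num n
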